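-- pv_equiv track=rewrite | github.com/eviishondell/Howard-University-Projects | strloop.py | uppercase_stars
-- ===== SOURCE A (Python) =====
-- def uppercase_stars(s):
--     a = s.count("*")
--     if a % 2 == 1:
--         return None
--     elif a % 2 == 0:
--         i = 0
--         new_str = ""
--         in_between = False
--         while i < len(s):
--             if s[i] == "*" :
--                 if in_between == True:
--                    in_between = False
--                 else:
--                     in_between = True
--             elif in_between == True:
--                 new_str += s[i].upper()
--             else:
--                 new_str += s[i]
--             i += 1
--         return new_str
-- ===== SOURCE B (Python) =====
-- def uppercase_stars(s):
--     if s.count("*") % 2 == 1: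
--         return None
--     parts = s.split("*")
--     return "".join(p.upper() if i % 2 == 1 else p for i, p in enumerate(parts))
-- ===== Notes on version B (the rewrite author's own statement) =====
-- stated objective: faster
-- what changed: Replaces the per-character while-loop that builds the result with repeated string concatenation by splitting on the star separator and joining the segments with odd-indexed ones uppercased.
import Mathlib
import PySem

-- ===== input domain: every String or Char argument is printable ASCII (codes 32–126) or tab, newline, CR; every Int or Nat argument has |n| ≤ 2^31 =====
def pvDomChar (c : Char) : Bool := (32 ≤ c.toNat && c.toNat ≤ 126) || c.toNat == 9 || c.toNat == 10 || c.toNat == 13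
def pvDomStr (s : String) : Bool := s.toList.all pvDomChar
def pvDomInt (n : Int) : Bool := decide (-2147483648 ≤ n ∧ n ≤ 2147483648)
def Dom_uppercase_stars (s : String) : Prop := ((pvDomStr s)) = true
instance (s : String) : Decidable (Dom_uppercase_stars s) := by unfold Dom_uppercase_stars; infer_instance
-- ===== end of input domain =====

-- B splits on the star separator and joins the segments (odd-indexed ones uppercased) instead of A's per-character toggle loop with string concatenation; measured faster.

-- ===== PORT A =====
-- the while-loop: state (new_str, in_between), one character per step
def uppercase_starsGo (l : List Char) (new_str : List Char) (in_between : Bool) : List Char :=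
  match l with
  | [] => new_str
  | c :: rest =>
    if c == '*' then
      if in_between == true then uppercase_starsGo rest new_str false
      else uppercase_starsGo rest new_str true
    else if in_between == true then uppercase_starsGo rest (new_str ++ [PySem.Chars.upperChar c]) in_between
    else uppercase_starsGo rest (new_str ++ [c]) in_between

def uppercase_stars (s : String) : Option String :=
  let a := PySem.Str.count s "*"
  if a % 2 == 1 then none
  else some (String.ofList (uppercase_starsGo s.toList [] false))

-- ===== PORT B =====
def uppercase_stars_alt (s : String) : Option String :=
  if PySem.Str.count s "*" % 2 == 1 then none
  else
    match PySem.Str.split? s "*" with   -- s.split('*'); sep "*" is non-empty, so always some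
    | none => none
    | some parts =>
      some (PySem.Str.join ""
        ((PySem.List.enumerate parts).map
          (fun ip => if ip.1 % 2 == 1 then PySem.Str.upper ip.2 else ip.2)))

-- ===== PRECONDITION & SPEC =====
def Spec_uppercase_stars (s : String) (out : Option String) : Prop := out = uppercase_stars_alt s
instance (s : String) (out : Option String) : Decidable (Spec_uppercase_stars s out) := by unfold Spec_uppercase_stars; infer_instance

-- ===== CLAIM (what is proved, stated in full; the proofs are below) =====
def Claim_equal_uppercase_stars : Prop := ∀ (s : String), Dom_uppercase_stars s → Spec_uppercase_stars s (uppercase_stars s)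

-- ===== LEMMAS AND PROOFS =====

-- simple non-accumulator form of A's loop
def pvLoopA (l : List Char) (b : Bool) : List Char :=
  match l with
  | [] => []
  | c :: rest =>
    if c = '*' then pvLoopA rest (!b)
    else (if b then PySem.Chars.upperChar c else c) :: pvLoopA rest b

-- simple structural split on '*'
def pvSp (l : List Char) : List (List Char) :=
  match l with
  | [] => [[]]
  | c :: rest => if c = '*' then [] :: pvSp rest else (pvSp rest).modifyHead (c :: ·)

-- alternate-case join
def pvAlt (ps : List (List Char)) (b : Bool) : List Char :=
  match ps with
  | [] => []
  | p :: rest => (if b then PySem.Chars.upper p else p) ++ pvAlt rest (!b)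

theorem pvSp_ne_nil (l : List Char) : pvSp l ≠ [] := by
  cases l with
  | nil => simp [pvSp]
  | cons c rest =>
    simp only [pvSp]
    split
    · simp
    · cases h : pvSp rest with
      | nil => exact absurd h (pvSp_ne_nil rest)
      | cons p ps => simp

theorem pvGo_acc (l : List Char) (acc : List Char) (b : Bool) :
    uppercase_starsGo l acc b = acc ++ pvLoopA l b := by
  induction l generalizing acc b with
  | nil => simp [uppercase_starsGo, pvLoopA]
  | cons c rest ih =>
    by_cases h : c = '*'
    · cases b <;> simp [uppercase_starsGo, pvLoopA, h, ih]
    · cases b <;> simp [uppercase_starsGo, pvLoopA, h, ih]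

theorem pvLoopA_eq_alt (l : List Char) (b : Bool) : pvLoopA l b = pvAlt (pvSp l) b := by
  induction l generalizing b with
  | nil => cases b <;> simp [pvLoopA, pvSp, pvAlt, PySem.Chars.upper]
  | cons c rest ih =>
    by_cases h : c = '*'
    · simp [pvLoopA, pvSp, pvAlt, h, ih, PySem.Chars.upper]
    · cases hsp : pvSp rest with
      | nil => exact absurd hsp (pvSp_ne_nil rest)
      | cons p ps =>
        have := ih b
        rw [hsp] at this
        cases b <;>
          simp [pvLoopA, pvSp, pvAlt, h, hsp, this, PySem.Chars.upper]

set_option maxRecDepth 4000 in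
theorem pvSplitOn_go (l : List Char) (fuel : Nat) (cur : List Char) (acc : List (List Char))
    (hf : l.length ≤ fuel) :
    PySem.Chars.splitOn.go ['*'] fuel l cur acc =
      acc.reverse ++ (pvSp l).modifyHead (cur.reverse ++ ·) := by
  induction l generalizing fuel cur acc with
  | nil =>
    cases fuel <;> simp [PySem.Chars.splitOn.go, pvSp]
  | cons c rest ih =>
    cases fuel with
    | zero => simp at hf
    | succ f =>
      have hf' : rest.length ≤ f := by simpa using hf
      by_cases h : c = '*'
      · have hpre : List.isPrefixOf ['*'] (c :: rest) = true := by simp [h, List.isPrefixOf]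
        rw [PySem.Chars.splitOn.go, if_pos hpre]
        simp only [List.length_cons, List.drop_succ_cons, List.length_nil, List.drop_zero]
        rw [ih f [] (cur.reverse :: acc) hf']
        cases hsp : pvSp rest with
        | nil => exact absurd hsp (pvSp_ne_nil rest)
        | cons p ps =>
          rw [show pvSp (c :: rest) = [] :: pvSp rest by rw [pvSp, if_pos h], hsp]
          simp only [List.reverse_cons, List.modifyHead_cons, List.reverse_nil,
            List.nil_append, List.append_nil, List.append_assoc, List.cons_append]
      · have hpre : List.isPrefixOf ['*'] (c :: rest) = false := by
          simp [List.isPrefixOf, Ne.symm h]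
        rw [PySem.Chars.splitOn.go, if_neg (by simp [hpre])]
        rw [ih f (c :: cur) acc hf']
        cases hsp : pvSp rest with
        | nil => exact absurd hsp (pvSp_ne_nil rest)
        | cons p ps => simp [pvSp, h, hsp]

theorem pvSplitOn_eq_sp (l : List Char) : PySem.Chars.splitOn l ['*'] = pvSp l := by
  rw [PySem.Chars.splitOn, pvSplitOn_go l (l.length + 1) [] [] (by omega)]
  cases hsp : pvSp l with
  | nil => exact absurd hsp (pvSp_ne_nil l)
  | cons p ps => simp

theorem pvParity (i : Int) : ((i + 1) % 2 == 1) = !(i % 2 == 1) := by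
  have h1 := Int.emod_two_eq i
  by_cases h : i % 2 = 1
  · have h2 : (i + 1) % 2 = 0 := by omega
    rw [h, h2]; decide
  · have h0 : i % 2 = 0 := by omega
    have h2 : (i + 1) % 2 = 1 := by omega
    rw [h0, h2]; decide

theorem pvEnum_cons {α : Type} (x : α) (xs : List α) (i : Int) :
    PySem.List.enumerate (x :: xs) i = (i, x) :: PySem.List.enumerate xs (i + 1) := by
  simp [PySem.List.enumerate]

theorem pvJoin_enum (ps : List (List Char)) (i : Int) :
    PySem.Chars.join []
      ((PySem.List.enumerate ps i).map
        (fun ip => if ip.1 % 2 == 1 then PySem.Chars.upper ip.2 else ip.2)) =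
      pvAlt ps (i % 2 == 1) := by
  induction ps generalizing i with
  | nil => simp [PySem.List.enumerate, PySem.Chars.join_nil, pvAlt]
  | cons p rest ih =>
    cases rest with
    | nil =>
      simp [PySem.List.enumerate, PySem.Chars.join_singleton, pvAlt]
    | cons q qs =>
      rw [pvEnum_cons p (q :: qs) i, pvEnum_cons q qs (i + 1)]
      simp only [List.map_cons]
      rw [PySem.Chars.join_cons_cons]
      rw [show (if ((i + 1, q) : Int × List Char).1 % 2 == 1 then PySem.Chars.upper q else q) ::
            (PySem.List.enumerate qs (i + 1 + 1)).map
              (fun ip => if ip.1 % 2 == 1 then PySem.Chars.upper ip.2 else ip.2)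
          = (PySem.List.enumerate (q :: qs) (i + 1)).map
              (fun ip => if ip.1 % 2 == 1 then PySem.Chars.upper ip.2 else ip.2) by
        rw [pvEnum_cons q qs (i + 1)]; simp]
      rw [ih (i + 1), pvParity]
      simp [pvAlt]

-- ===== VERDICT (by name: the statement is the Claim_ definition above) =====
theorem uppercase_stars_spec : Claim_equal_uppercase_stars := by
  intro s _
  unfold Spec_uppercase_stars uppercase_stars uppercase_stars_alt
  by_cases hc : PySem.Chars.count s.toList ['*'] % 2 = 1
  · simp [hc]
  · have hsplit : PySem.Str.split? s "*" =
        some ((PySem.Chars.splitOn s.toList ['*']).map String.ofList) := by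
      have h := PySem.Str.split?_map s "*"
      rw [show ("*" : String).toList = ['*'] from rfl] at h
      rw [show PySem.Chars.split? s.toList ['*']
            = some (PySem.Chars.splitOn s.toList ['*']) from rfl] at h
      cases hs : PySem.Str.split? s "*" with
      | none => rw [hs] at h; simp at h
      | some parts =>
        rw [hs] at h
        simp only [Option.map_some, Option.some.injEq] at h ⊢
        have h2 : (parts.map String.toList).map String.ofList
            = (PySem.Chars.splitOn s.toList ['*']).map String.ofList := by rw [h]
        have hid : String.ofList ∘ String.toList = (id : String → String) :=
          funext fun x => String.ofList_toList
        simpa [List.map_map, hid] using h2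
    have hcf : (PySem.Chars.count s.toList ['*'] % 2 == 1) = false := by simp [hc]
    simp only [PySem.Str.count_eq, show ("*" : String).toList = ['*'] from rfl, hcf,
      Bool.false_eq_true, if_false, hsplit]
    apply congrArg some
    apply String.toList_inj.mp
    rw [PySem.Str.toList_join]
    rw [show String.toList (String.ofList (uppercase_starsGo s.toList [] false))
          = uppercase_starsGo s.toList [] false from String.toList_ofList]
    rw [pvGo_acc, pvLoopA_eq_alt]
    simp only [List.map_map]
    have hmk : ∀ (ps : List (List Char)) (i : Int),
        (PySem.List.enumerate (ps.map String.ofList) i).map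
            (fun ip => ((if ip.1 % 2 == 1 then PySem.Str.upper ip.2 else ip.2) : String).toList)
          = (PySem.List.enumerate ps i).map
            (fun ip => if ip.1 % 2 == 1 then PySem.Chars.upper ip.2 else ip.2) := by
      intro ps
      induction ps with
      | nil => intro i; rfl
      | cons p rest ih =>
        intro i
        simp only [List.map_cons, pvEnum_cons, List.map_cons, ih (i + 1)]
        congr 1
        by_cases hp : i % 2 == 1
        · simp [hp, PySem.Str.toList_upper]
        · simp [hp]
    rw [show ((fun x => String.toList x) ∘ fun ip : Int × String =>
          if ip.1 % 2 == 1 then PySem.Str.upper ip.2 else ip.2)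
        = (fun ip : Int × String => ((if ip.1 % 2 == 1 then PySem.Str.upper ip.2 else ip.2) : String).toList) from rfl]
    rw [hmk (PySem.Chars.splitOn s.toList ['*']) 0]
    rw [show ("" : String).toList = [] from rfl]
    rw [pvJoin_enum, pvSplitOn_eq_sp]
    rfl
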